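-- pv_equiv track=rewrite | github.com/jhthirteen/myRunning | cleanOutput.py | findClasses
-- ===== SOURCE A (Python) =====
-- def findClasses(data, id):
--     classes = []
--     for i in range(len(data)):
--         if( data[i][0] == id[0][0] ):
--             numWords = 0
--             splitIndexes = []
--             runningIndex = 0
--             classFormatted = ""
--             for c in data[i][1]:
--                 if( c.isupper() ):
--                     numWords += 1
--                     splitIndexes.append(runningIndex)
--                 runningIndex += 1
--             initial = 0
--             for j in range(len(splitIndexes)):
--                 if( splitIndexes[j] == 0 ):
--                     continue
--                 classFormatted = classFormatted + data[i][1][initial:splitIndexes[j]] + " "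
--                 initial = splitIndexes[j]
--             classFormatted = classFormatted + data[i][1][initial:len(data[i][1])]
--             classes.append(classFormatted)
--
--     return classes
-- ===== SOURCE B (Python) =====
-- def findClasses(data, id):
--     def fmt(name):
--         out = []
--         for i, c in enumerate(name):
--             if i != 0 and c.isupper():
--                 out.append(' ')
--             out.append(c)
--         return ''.join(out)
--     return [fmt(row[1]) for row in data if row[0] == id[0][0]]
-- ===== Notes on version B (the rewrite author's own statement) =====
-- stated objective: simpler
-- what changed: The three inner passes of A (collect uppercase indexes, then slice between consecutive split points, then append the tail slice) are replaced by one direct pass over the class name that inserts a space before every uppercase character at a nonzero index, and the outer loop becomes a list comprehension.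
import Mathlib
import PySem

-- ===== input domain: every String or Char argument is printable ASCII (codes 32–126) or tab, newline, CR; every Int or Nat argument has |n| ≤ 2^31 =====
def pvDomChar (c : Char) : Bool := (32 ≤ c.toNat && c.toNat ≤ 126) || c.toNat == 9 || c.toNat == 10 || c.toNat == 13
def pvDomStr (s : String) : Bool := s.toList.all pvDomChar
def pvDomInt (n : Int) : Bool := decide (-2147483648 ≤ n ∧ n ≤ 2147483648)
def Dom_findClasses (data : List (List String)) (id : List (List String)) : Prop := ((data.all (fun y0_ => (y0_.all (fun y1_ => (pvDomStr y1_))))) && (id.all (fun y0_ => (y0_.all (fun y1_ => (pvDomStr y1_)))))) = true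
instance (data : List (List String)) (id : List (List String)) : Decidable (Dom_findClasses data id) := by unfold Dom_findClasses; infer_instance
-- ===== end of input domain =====

-- B replaces A's three inner passes (index table, slice loop, tail slice) by one direct pass
-- inserting a space before each uppercase character at a nonzero index; objective: simpler.

-- ===== PORT A =====
-- the body of A's outer for-loop, for one row data[i]
def aProcessRow (id : List (List String)) (classes : List String) (row : List String) : List String :=
  if PySem.List.pyGetD row 0 "" == PySem.List.pyGetD (PySem.List.pyGetD id 0 []) 0 "" then
        let s : List Char := (PySem.List.pyGetD row 1 "").toList
        let st : Nat × List Nat × Nat :=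
          List.foldl
            (fun (st : Nat × List Nat × Nat) c =>
              if PySem.Chars.isupper c then (st.1 + 1, st.2.1 ++ [st.2.2], st.2.2 + 1)
              else (st.1, st.2.1, st.2.2 + 1))
            (0, [], 0) s
        let splitIndexes := st.2.1
        let fin : List Char × Nat :=
          List.foldl
            (fun (p : List Char × Nat) j =>
              let sj := PySem.List.pyGetD splitIndexes j 0
              if sj == 0 then p
              else (p.1 ++ PySem.List.slice s (some (p.2 : Int)) (some (sj : Int)) ++ [' '], sj))
            ([], 0) (PySem.List.pyRange 0 (PySem.List.len splitIndexes))
        let classFormatted :=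
          fin.1 ++ PySem.List.slice s (some (fin.2 : Int)) (some (s.length : Int))
        classes ++ [String.ofList classFormatted]
      else classes

def findClasses (data : List (List String)) (id : List (List String)) : List String :=
  List.foldl
    (fun classes i => aProcessRow id classes (PySem.List.pyGetD data i []))
    [] (PySem.List.pyRange 0 (PySem.List.len data))

-- ===== PORT B =====
-- B's inner loop: one pass with enumerate, space before each uppercase char at index ≠ 0.
def fmtClass (name : List Char) : List Char :=
  List.foldl
    (fun out ic =>
      (if ic.1 ≠ (0 : Int) && PySem.Chars.isupper ic.2 then out ++ [' '] else out) ++ [ic.2])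
    [] (PySem.List.enumerate name)

def findClasses_alt (data : List (List String)) (id : List (List String)) : List String :=
  (data.filter
      (fun row => PySem.List.pyGetD row 0 "" == PySem.List.pyGetD (PySem.List.pyGetD id 0 []) 0 "")).map
    (fun row => String.ofList (fmtClass (PySem.List.pyGetD row 1 "").toList))

-- ===== PRECONDITION & SPEC =====
-- Pre_ excludes exactly the inputs where the Python raises IndexError: when data is nonempty,
-- id[0][0] must exist, every row must be nonempty, and a row whose first entry matches id[0][0]
-- must have a second entry.
def Pre_findClasses (data : List (List String)) (id : List (List String)) : Prop :=
  ∀ row ∈ data,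
    1 ≤ id.length ∧ 1 ≤ id.headI.length ∧ 1 ≤ row.length ∧
      (row.headI = id.headI.headI → 2 ≤ row.length)
instance (data : List (List String)) (id : List (List String)) : Decidable (Pre_findClasses data id) := by unfold Pre_findClasses; infer_instance

def pvWitness_findClasses : List (List String) × List (List String) :=
  ([["r1", "IntroToCS"], ["r2", "Math"]], [["r1"]])

def Spec_findClasses (data : List (List String)) (id : List (List String)) (out : List String) : Prop := out = findClasses_alt data id
instance (data : List (List String)) (id : List (List String)) (out : List String) : Decidable (Spec_findClasses data id out) := by unfold Spec_findClasses; infer_instance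

-- ===== CLAIM (what is proved, stated in full; the proofs are below) =====
def Claim_equal_findClasses : Prop := ∀ (data : List (List String)) (id : List (List String)), Dom_findClasses data id → Pre_findClasses data id → Spec_findClasses data id (findClasses data id)

-- ===== LEMMAS AND PROOFS =====

-- the uppercase positions of t, counted from offset r (A's splitIndexes)
def upIdxFrom (r : Nat) : List Char → List Nat
  | [] => []
  | c :: cs => (if PySem.Chars.isupper c then [r] else []) ++ upIdxFrom (r + 1) cs

-- structural form of A's slicing loop (skip index 0, slice between split points, final tail)
def aFmt (s : List Char) (init : Nat) : List Nat → List Char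
  | [] => s.drop init
  | j :: js =>
      if j = 0 then aFmt s init js
      else (s.drop init).take (j - init) ++ ' ' :: aFmt s j js

-- space before every uppercase character (B's behaviour on a strict suffix)
def wFmt : List Char → List Char
  | [] => []
  | c :: cs => (if PySem.Chars.isupper c then [' ', c] else [c]) ++ wFmt cs

theorem mem_upIdxFrom_le {r j : Nat} {t : List Char} (h : j ∈ upIdxFrom r t) : r ≤ j := by
  induction t generalizing r with
  | nil => simp [upIdxFrom] at h
  | cons c cs ih =>
      simp only [upIdxFrom, List.mem_append] at h
      rcases h with h | h
      · split at h <;> simp_all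
      · exact Nat.le_of_succ_le (ih h)

theorem aFmt_cons (s : List Char) (d : Char) (init : Nat) (js : List Nat)
    (hd : s.drop init = d :: s.drop (init + 1)) (hjs : ∀ j ∈ js, init + 1 ≤ j) :
    aFmt s init js = d :: aFmt s (init + 1) js := by
  cases js with
  | nil => simpa [aFmt] using hd
  | cons j js =>
      have hj : init + 1 ≤ j := hjs j (by simp)
      have hj0 : ¬ j = 0 := by omega
      simp only [aFmt, hj0, if_false]
      rw [hd]
      have : j - init = (j - (init + 1)) + 1 := by omega
      rw [this, List.take_succ_cons]
      simp

theorem aFmt_upIdxFrom (t : List Char) : ∀ (s : List Char) (init : Nat), 1 ≤ init →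
    s.drop init = t → aFmt s init (upIdxFrom init t) = wFmt t := by
  induction t with
  | nil => intro s init _ h; simp [upIdxFrom, aFmt, h, wFmt]
  | cons d ds ih =>
      intro s init hinit h
      have hdrop : s.drop (init + 1) = ds := by
        have : s.drop (init + 1) = (s.drop init).drop 1 := by
          rw [List.drop_drop]
        rw [this, h]; rfl
      have hd : s.drop init = d :: s.drop (init + 1) := by rw [hdrop, h]
      by_cases hu : PySem.Chars.isupper d
      · have hux : upIdxFrom init (d :: ds) = init :: upIdxFrom (init + 1) ds := by
          simp [upIdxFrom, hu]
        have h0 : ¬ init = 0 := by omega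
        rw [hux]
        simp only [aFmt, h0, if_false, Nat.sub_self, List.take_zero, List.nil_append]
        rw [aFmt_cons s d init _ hd (fun j hj => mem_upIdxFrom_le hj),
            ih s (init + 1) (by omega) hdrop]
        simp [wFmt, hu]
      · have hux : upIdxFrom init (d :: ds) = upIdxFrom (init + 1) ds := by
          simp [upIdxFrom, hu]
        rw [hux, aFmt_cons s d init _ hd (fun j hj => mem_upIdxFrom_le hj),
            ih s (init + 1) (by omega) hdrop]
        simp [wFmt, hu]

-- A's first inner loop computes upIdxFrom
theorem collect_eq (s : List Char) : ∀ (nw r : Nat) (acc : List Nat),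
    List.foldl
      (fun (st : Nat × List Nat × Nat) c =>
        if PySem.Chars.isupper c then (st.1 + 1, st.2.1 ++ [st.2.2], st.2.2 + 1)
        else (st.1, st.2.1, st.2.2 + 1)) (nw, acc, r) s
    = (nw + s.countP PySem.Chars.isupper, acc ++ upIdxFrom r s, r + s.length) := by
  induction s with
  | nil => intro nw r acc; simp [upIdxFrom]
  | cons c cs ih =>
      intro nw r acc
      by_cases hu : PySem.Chars.isupper c <;>
        simp [hu, ih, upIdxFrom, Nat.add_assoc, Nat.add_comm 1]

-- A's slicing loop, folded over the index list, equals aFmt (with an accumulator prefix)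
theorem sliceLoop_eq (s : List Char) : ∀ (L : List Nat) (acc : List Char) (init : Nat),
    (let fin := List.foldl
        (fun (p : List Char × Nat) (j : Nat) =>
          if j == 0 then p
          else (p.1 ++ PySem.List.slice s (some (p.2 : Int)) (some (j : Int)) ++ [' '], j))
        (acc, init) L
     fin.1 ++ PySem.List.slice s (some (fin.2 : Int)) (some (s.length : Int)))
    = acc ++ aFmt s init L := by
  intro L
  induction L with
  | nil =>
      intro acc init
      simp only [List.foldl_nil, aFmt, PySem.List.slice_natCast]
      rw [List.take_of_length_le (by simp)]
  | cons j js ih =>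
      intro acc init
      by_cases hj : j = 0
      · simpa [hj, aFmt] using ih acc init
      · have hj' : ¬ (j == 0) = true := by simp [hj]
        simp only [List.foldl_cons, hj', if_false, aFmt, hj]
        rw [ih, PySem.List.slice_natCast]
        simp

-- B's loop over enumerate, on the tail (offset ≥ 1), equals wFmt (with an accumulator prefix)
theorem fmt_tail_eq (cs : List Char) : ∀ (k : Int) (acc : List Char), 1 ≤ k →
    List.foldl
      (fun out ic =>
        (if ic.1 ≠ (0 : Int) && PySem.Chars.isupper ic.2 then out ++ [' '] else out) ++ [ic.2])
      acc (PySem.List.enumerate cs k)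
    = acc ++ wFmt cs := by
  induction cs with
  | nil => intro k acc _; simp [PySem.List.enumerate, wFmt]
  | cons c cs ih =>
      intro k acc hk
      have hk0 : ¬ k = 0 := by omega
      by_cases hu : PySem.Chars.isupper c <;>
        · simp only [PySem.List.enumerate, List.foldl_cons, hu]
          rw [ih (k + 1) _ (by omega)]
          simp [wFmt, hu, hk0]

-- the inner computations agree: A's three passes = B's one pass
theorem inner_eq (s : List Char) :
    (let st := List.foldl
        (fun (st : Nat × List Nat × Nat) c =>
          if PySem.Chars.isupper c then (st.1 + 1, st.2.1 ++ [st.2.2], st.2.2 + 1)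
          else (st.1, st.2.1, st.2.2 + 1)) (0, [], 0) s
     let splitIndexes := st.2.1
     let fin := List.foldl
        (fun (p : List Char × Nat) j =>
          let sj := PySem.List.pyGetD splitIndexes j 0
          if sj == 0 then p
          else (p.1 ++ PySem.List.slice s (some (p.2 : Int)) (some (sj : Int)) ++ [' '], sj))
        ([], 0) (PySem.List.pyRange 0 (PySem.List.len splitIndexes))
     fin.1 ++ PySem.List.slice s (some (fin.2 : Int)) (some (s.length : Int)))
    = fmtClass s := by
  show _ = fmtClass s
  rw [collect_eq s 0 0 []]
  simp only [List.nil_append]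
  rw [PySem.List.foldl_pyRange_pyGetD (upIdxFrom 0 s) 0
        (fun (p : List Char × Nat) (sj : Nat) =>
          if sj == 0 then p
          else (p.1 ++ PySem.List.slice s (some (p.2 : Int)) (some (sj : Int)) ++ [' '], sj))
        ([], 0) (le_refl 0)]
  rw [Int.toNat_zero, List.drop_zero]
  rw [sliceLoop_eq s (upIdxFrom 0 s) [] 0]
  -- now show aFmt s 0 (upIdxFrom 0 s) = fmtClass s
  cases s with
  | nil => simp [upIdxFrom, aFmt, fmtClass, PySem.List.enumerate]
  | cons c cs =>
      have hd : (c :: cs).drop 0 = c :: (c :: cs).drop 1 := by simp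
      have hrest : aFmt (c :: cs) 0 (upIdxFrom 1 cs) = c :: wFmt cs := by
        rw [aFmt_cons (c :: cs) c 0 _ hd (fun j hj => mem_upIdxFrom_le hj)]
        rw [aFmt_upIdxFrom cs (c :: cs) 1 (le_refl 1) (by simp)]
      have hfmt : fmtClass (c :: cs) = c :: wFmt cs := by
        unfold fmtClass
        rw [show PySem.List.enumerate (c :: cs) 0 = (0, c) :: PySem.List.enumerate cs 1 by
              simp [PySem.List.enumerate],
            List.foldl_cons,
            show ((if (0 : Int) ≠ 0 && PySem.Chars.isupper c then ([] : List Char) ++ [' ']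
                   else []) ++ [c]) = [c] by simp,
            fmt_tail_eq cs 1 [c] (le_refl 1)]
        rfl
      rw [hfmt]
      by_cases hu : PySem.Chars.isupper c
      · simp only [upIdxFrom, hu, if_true, List.singleton_append, aFmt]
        exact hrest
      · simp only [upIdxFrom, hu]
        exact hrest

theorem aProcessRow_eq (id : List (List String)) :
    aProcessRow id = fun (classes : List String) (row : List String) =>
      if PySem.List.pyGetD row 0 "" == PySem.List.pyGetD (PySem.List.pyGetD id 0 []) 0 "" then
        classes ++ [String.ofList (fmtClass (PySem.List.pyGetD row 1 "").toList)]
      else classes := by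
  funext classes row
  unfold aProcessRow
  by_cases hc : (PySem.List.pyGetD row 0 "" == PySem.List.pyGetD (PySem.List.pyGetD id 0 []) 0 "") = true
  · simp only [hc, if_true]
    exact congrArg (fun x => classes ++ [String.ofList x])
      (inner_eq (PySem.List.pyGetD row 1 "").toList)
  · simp [hc]

-- ===== VERDICT (by name: the statement is the Claim_ definition above) =====
theorem findClasses_spec : Claim_equal_findClasses := by
  intro data id _ _
  unfold Spec_findClasses findClasses findClasses_alt
  rw [PySem.List.foldl_pyRange_pyGetD data [] (aProcessRow id) [] (le_refl 0)]
  rw [Int.toNat_zero, List.drop_zero, aProcessRow_eq id, PySem.List.foldl_append_if]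
  simp
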